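-- pv_equiv track=rewrite | github.com/to-be-pass/python-coding-test | src/dayaelee/ch_14/solution_063.py | solution
-- ===== SOURCE A (Python) =====
-- def solution(matrix1, matrix2):
--
--     n = len(matrix1)
--     m = len(matrix2[0])
--
--     newMat = [[0 for _ in range(n)] for _ in range(m)]
--
--     for i in range(n):
--
--         for q in range(n):
--             sum = 0
--             for j in range(m):
--                 sum += matrix1[i][j] * matrix2[j][q]
--                 if j == m-1:
--                     newMat[i][q] = sum
--
--     tmp = 0
--
--     check = []
--
--     for i in range(n):
--         for j in range(m):
--             if i == j:
--                 pass
--             else: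
--                 check2 = 1
--                 for kk in check:
--                     if kk == [i, j]:
--                         check2 = 0
--                         break
--
--                 if check2 == 0:
--                     continue
--
--                 tmp = newMat[i][j]
--                 newMat[i][j] = newMat[j][i]
--                 newMat[j][i] = tmp
--
--                 check.append([j, i])
--
--     return newMat
-- ===== SOURCE B (Python) =====
-- def solution(matrix1, matrix2):
--     n = len(matrix1)
--     m = len(matrix2[0])
--     return [[sum(matrix1[b][j] * matrix2[j][a] for j in range(m))
--              for b in range(n)]
--             for a in range(m)]
-- ===== Notes on version B (the rewrite author's own statement) =====
-- stated objective: faster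
-- what changed: B builds the transposed product directly with one comprehension (result[a][b] = sum_j matrix1[b][j]*matrix2[j][a]) instead of A's multiply-into-a-preallocated-matrix followed by an in-place element-swap transpose guarded by a linearly-scanned 'check' dedup list.
import Mathlib
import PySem

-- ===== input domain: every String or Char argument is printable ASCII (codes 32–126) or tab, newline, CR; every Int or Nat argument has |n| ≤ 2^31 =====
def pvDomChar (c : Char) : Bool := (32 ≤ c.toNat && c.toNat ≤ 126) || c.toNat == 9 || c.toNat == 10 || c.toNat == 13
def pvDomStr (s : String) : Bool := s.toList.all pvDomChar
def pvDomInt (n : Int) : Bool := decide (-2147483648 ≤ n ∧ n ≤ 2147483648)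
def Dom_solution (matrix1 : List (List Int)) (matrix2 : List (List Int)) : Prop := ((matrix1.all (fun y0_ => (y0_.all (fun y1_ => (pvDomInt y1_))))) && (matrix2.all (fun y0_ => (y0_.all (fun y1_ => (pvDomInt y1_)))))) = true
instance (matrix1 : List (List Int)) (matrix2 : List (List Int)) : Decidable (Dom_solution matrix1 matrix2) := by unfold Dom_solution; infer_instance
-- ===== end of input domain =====

-- B computes the transposed product directly in one comprehension pass instead of A's
-- multiply-then-in-place-swap-with-a-dedup-list; objective: faster (A's transpose pass
-- scans its growing 'check' list per cell; a timing run measured B faster).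

-- ===== PORT A =====
-- mat[a][b] read; under Pre_ every index is in range, so the default 0 / [] is never the value
-- Python sees (out-of-range indexing raises IndexError in Python and is excluded by Pre_).
def g (mat : List (List Int)) (a b : Nat) : Int := (mat.getD a []).getD b 0

-- mat[a][b] = v (in-place row update; in range under Pre_)
def set2 (mat : List (List Int)) (a b : Nat) (v : Int) : List (List Int) :=
  mat.set a ((mat.getD a []).set b v)

-- the 'for kk in check: if kk == [i, j]: check2 = 0; break' scan, literally
def checkScan : List (List Int) → List Int → Nat
  | [], _ => 1
  | kk :: rest, t => if kk = t then 0 else checkScan rest t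

def solution (matrix1 : List (List Int)) (matrix2 : List (List Int)) : List (List Int) :=
  let n := matrix1.length
  let m := (matrix2.headD []).length
  let newMat : List (List Int) := (List.range m).map (fun _ => (List.range n).map (fun _ => (0 : Int)))
  let mat1 := (List.range n).foldl (fun acc i =>
    (List.range n).foldl (fun acc q =>
      ((List.range m).foldl (fun (p : Int × List (List Int)) j =>
          let s := p.1 + g matrix1 i j * g matrix2 j q
          (s, if j = m - 1 then set2 p.2 i q s else p.2))
        ((0 : Int), acc)).2) acc) newMat
  let fin := (List.range n).foldl (fun (st : List (List Int) × List (List Int)) (i : Nat) =>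
      (List.range m).foldl (fun st (j : Nat) =>
        if i = j then st
        else if checkScan st.2 [(i : Int), (j : Int)] = 0 then st
        else
          let tmp := g st.1 i j
          let mat' := set2 st.1 i j (g st.1 j i)
          let mat'' := set2 mat' j i tmp
          (mat'', st.2 ++ [[(j : Int), (i : Int)]])) st)
    (mat1, ([] : List (List Int)))
  fin.1

-- ===== PORT B =====
def solution_alt (matrix1 : List (List Int)) (matrix2 : List (List Int)) : List (List Int) :=
  let n := matrix1.length
  let m := (matrix2.headD []).length
  (List.range m).map (fun a => (List.range n).map (fun b =>
    (List.range m).foldl (fun s j => s + g matrix1 b j * g matrix2 j a) 0))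

-- ===== PRECONDITION & SPEC =====
-- Exactly the inputs on which Python A returns: matrix2 nonempty (len(matrix2[0]));
-- and either n = 0 or m = 0 (the loops that index never run) or n = m with every indexed
-- access in range (rows of matrix1 of length ≥ m, matrix2 with ≥ m rows whose first m rows
-- have length ≥ n).  On every other input A raises IndexError.
def Pre_solution (matrix1 : List (List Int)) (matrix2 : List (List Int)) : Prop :=
  matrix2 ≠ [] ∧
  (matrix1.length = 0 ∨ (matrix2.headD []).length = 0 ∨
    (matrix1.length = (matrix2.headD []).length ∧
     (∀ r ∈ matrix1, (matrix2.headD []).length ≤ r.length) ∧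
     (matrix2.headD []).length ≤ matrix2.length ∧
     (∀ r ∈ matrix2.take ((matrix2.headD []).length), matrix1.length ≤ r.length)))
instance (matrix1 : List (List Int)) (matrix2 : List (List Int)) : Decidable (Pre_solution matrix1 matrix2) := by unfold Pre_solution; infer_instance

def pvWitness_solution : List (List Int) × List (List Int) := ([[1, 2], [3, 4]], [[5, 6], [7, 8]])

def Spec_solution (matrix1 : List (List Int)) (matrix2 : List (List Int)) (out : List (List Int)) : Prop := out = solution_alt matrix1 matrix2
instance (matrix1 : List (List Int)) (matrix2 : List (List Int)) (out : List (List Int)) : Decidable (Spec_solution matrix1 matrix2 out) := by unfold Spec_solution; infer_instance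

-- ===== CLAIM (what is proved, stated in full; the proofs are below) =====
def Claim_equal_solution : Prop := ∀ (matrix1 : List (List Int)) (matrix2 : List (List Int)), Dom_solution matrix1 matrix2 → Pre_solution matrix1 matrix2 → Spec_solution matrix1 matrix2 (solution matrix1 matrix2)


-- ===== LEMMAS AND PROOFS =====

def MShape (mat : List (List Int)) (k : Nat) : Prop :=
  mat.length = k ∧ ∀ c, c < k → (mat.getD c []).length = k

def Pmul (m1 m2 : List (List Int)) (k b a : Nat) : Int :=
  (List.range k).foldl (fun s j => s + g m1 b j * g m2 j a) 0

lemma foldl_self {α β : Type} (l : List β) (a : α) : l.foldl (fun x _ => x) a = a := by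
  induction l generalizing a with
  | nil => rfl
  | cons x xs ih => simpa using ih a

lemma getD_set2 (mat : List (List Int)) (a b c : Nat) (v : Int) (ha : a < mat.length) :
    (set2 mat a b v).getD c [] = if c = a then (mat.getD a []).set b v else mat.getD c [] := by
  simp only [set2, List.getD_eq_getElem?_getD, List.getElem?_set]
  by_cases h : a = c
  · subst h; simp [ha]
  · simp [h, Ne.symm h]

lemma shape_set2 {mat : List (List Int)} {k : Nat} (h : MShape mat k) (a b : Nat) (v : Int) :
    MShape (set2 mat a b v) k := by
  obtain ⟨h1, h2⟩ := h
  refine ⟨by simp [set2, h1], fun c hc => ?_⟩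
  by_cases hak : a < mat.length
  · rw [getD_set2 mat a b c v hak]
    split_ifs with h3
    · subst h3; rw [List.length_set]; exact h2 c hc
    · exact h2 c hc
  · have : mat.set a ((mat.getD a []).set b v) = mat := List.set_eq_of_length_le (by omega)
    rw [set2, this]; exact h2 c hc

lemma g_set2 (mat : List (List Int)) (a b c d : Nat) (v : Int)
    (ha : a < mat.length) (hb : b < (mat.getD a []).length) :
    g (set2 mat a b v) c d = if c = a ∧ d = b then v else g mat c d := by
  rw [g, getD_set2 mat a b c v ha]
  by_cases hc : c = a
  · subst hc
    simp only [if_pos rfl, true_and]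
    by_cases hd : d = b
    · subst hd
      rw [List.getD_eq_getElem?_getD] at hb
      simp [List.getD_eq_getElem?_getD, List.getElem?_set, hb]
    · simp [List.getD_eq_getElem?_getD, List.getElem?_set, Ne.symm hd, hd, g]
  · simp [hc, g]

lemma Pmul_succ (m1 m2 : List (List Int)) (t b a : Nat) :
    Pmul m1 m2 (t + 1) b a = Pmul m1 m2 t b a + g m1 b t * g m2 t a := by
  simp [Pmul, List.range_succ]

lemma jfold_aux (m1 m2 : List (List Int)) (k i q : Nat) (hk : 0 < k)
    (acc : List (List Int)) (t : Nat) (ht : t ≤ k) :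
    (List.range t).foldl (fun (p : Int × List (List Int)) j =>
        (p.1 + g m1 i j * g m2 j q,
          if j = k - 1 then set2 p.2 i q (p.1 + g m1 i j * g m2 j q) else p.2))
      ((0 : Int), acc)
    = (Pmul m1 m2 t i q, if t = k then set2 acc i q (Pmul m1 m2 k i q) else acc) := by
  induction t with
  | zero => simp [Pmul]; omega
  | succ t ih =>
    rw [List.range_succ, List.foldl_append, ih (by omega)]
    have htk : ¬ (t = k) := by omega
    simp only [List.foldl_cons, List.foldl_nil, htk, if_false]
    rw [← Pmul_succ]
    by_cases h : t = k - 1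
    · subst h
      rw [show k - 1 + 1 = k from by omega]
      simp
    · have : ¬ (t + 1 = k) := by omega
      simp [h, this]

lemma qfold (m1 m2 : List (List Int)) (k i : Nat) (hk : 0 < k) (hi : i < k)
    (acc : List (List Int)) (hsh : MShape acc k) (t : Nat) (ht : t ≤ k) :
    MShape ((List.range t).foldl (fun acc q =>
        ((List.range k).foldl (fun (p : Int × List (List Int)) j =>
            (p.1 + g m1 i j * g m2 j q,
              if j = k - 1 then set2 p.2 i q (p.1 + g m1 i j * g m2 j q) else p.2))
          ((0 : Int), acc)).2) acc) k ∧
    ∀ c d, c < k → d < k →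
      g ((List.range t).foldl (fun acc q =>
        ((List.range k).foldl (fun (p : Int × List (List Int)) j =>
            (p.1 + g m1 i j * g m2 j q,
              if j = k - 1 then set2 p.2 i q (p.1 + g m1 i j * g m2 j q) else p.2))
          ((0 : Int), acc)).2) acc) c d
      = if c = i ∧ d < t then Pmul m1 m2 k i d else g acc c d := by
  induction t with
  | zero => exact ⟨hsh, by simp⟩
  | succ t ih =>
    obtain ⟨ihs, ihv⟩ := ih (by omega)
    rw [List.range_succ, List.foldl_append]
    set r := (List.range t).foldl _ acc with hr
    rw [List.foldl_cons, List.foldl_nil, jfold_aux m1 m2 k i t hk r k le_rfl]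
    rw [if_pos rfl]
    refine ⟨shape_set2 ihs i t _, fun c d hc hd => ?_⟩
    rw [g_set2 r i t c d _ (by rw [ihs.1]; exact hi) (by rw [ihs.2 i hi]; omega)]
    by_cases h1 : c = i ∧ d = t
    · simp [h1]
    · rw [if_neg h1, ihv c d hc hd]
      by_cases h2 : c = i ∧ d < t
      · rw [if_pos h2, if_pos ⟨h2.1, by omega⟩]
      · rw [if_neg h2, if_neg (by omega)]

lemma ifold (m1 m2 : List (List Int)) (k : Nat) (hk : 0 < k)
    (acc : List (List Int)) (hsh : MShape acc k) (t : Nat) (ht : t ≤ k) :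
    MShape ((List.range t).foldl (fun acc i =>
        (List.range k).foldl (fun acc q =>
          ((List.range k).foldl (fun (p : Int × List (List Int)) j =>
              (p.1 + g m1 i j * g m2 j q,
                if j = k - 1 then set2 p.2 i q (p.1 + g m1 i j * g m2 j q) else p.2))
            ((0 : Int), acc)).2) acc) acc) k ∧
    ∀ c d, c < k → d < k →
      g ((List.range t).foldl (fun acc i =>
        (List.range k).foldl (fun acc q =>
          ((List.range k).foldl (fun (p : Int × List (List Int)) j =>
              (p.1 + g m1 i j * g m2 j q,
                if j = k - 1 then set2 p.2 i q (p.1 + g m1 i j * g m2 j q) else p.2))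
            ((0 : Int), acc)).2) acc) acc) c d
      = if c < t then Pmul m1 m2 k c d else g acc c d := by
  induction t with
  | zero => exact ⟨hsh, by simp⟩
  | succ t ih =>
    obtain ⟨ihs, ihv⟩ := ih (by omega)
    rw [List.range_succ, List.foldl_append]
    set r := (List.range t).foldl _ acc with hr
    rw [List.foldl_cons, List.foldl_nil]
    obtain ⟨qs, qv⟩ := qfold m1 m2 k t hk (by omega) r ihs k le_rfl
    refine ⟨qs, fun c d hc hd => ?_⟩
    rw [qv c d hc hd]
    by_cases h1 : c = t
    · simp [h1, hd]
    · rw [if_neg (by omega), ihv c d hc hd]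
      by_cases h2 : c < t
      · rw [if_pos h2, if_pos (by omega)]
      · rw [if_neg h2, if_neg (by omega)]

lemma checkScan_eq (l : List (List Int)) (t : List Int) :
    checkScan l t = if t ∈ l then 0 else 1 := by
  induction l with
  | nil => simp [checkScan]
  | cons x xs ih =>
    rw [checkScan, ih]
    by_cases h : x = t
    · simp [h]
    · have h' : ¬ (t = x) := fun e => h e.symm
      simp [h, h']

def checkAt (k i j : Nat) : List (List Int) :=
  ((List.range i).flatMap (fun i' =>
      ((List.range k).filter (fun j' => decide (i' < j'))).map (fun j' => [(j' : Int), (i' : Int)])))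
  ++ ((List.range j).filter (fun j' => decide (i < j'))).map (fun j' => [(j' : Int), (i : Int)])

lemma mem_checkAt (k i j : Nat) (hj : j ≤ k) :
    ([(i : Int), (j : Int)] ∈ checkAt k i j) ↔ (j < i ∧ i < k) := by
  constructor
  · intro h
    simp [checkAt, List.mem_append, List.mem_flatMap, List.mem_map, List.mem_filter,
      List.mem_range] at h
    rcases h with ⟨a, ha, b, hb, h1, h2⟩ | ⟨a, ha, h1, h2⟩ <;> omega
  · intro ⟨h1, h2⟩
    simp [checkAt, List.mem_append, List.mem_flatMap, List.mem_map, List.mem_filter,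
      List.mem_range]
    exact ⟨h1, h2, h1⟩

def SwapInv (m1 m2 : List (List Int)) (k : Nat) (st : List (List Int) × List (List Int)) (i j : Nat) : Prop :=
  MShape st.1 k ∧ st.2 = checkAt k i j ∧
  ∀ a b, a < k → b < k →
    g st.1 a b = if a ≠ b ∧ (min a b < i ∨ (min a b = i ∧ max a b < j))
      then Pmul m1 m2 k b a else Pmul m1 m2 k a b

lemma checkAt_succ_j (k i j : Nat) :
    checkAt k i (j + 1)
      = checkAt k i j ++ (if i < j then [[(j : Int), (i : Int)]] else []) := by
  simp only [checkAt, List.range_succ, List.filter_append, List.map_append, List.append_assoc]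
  by_cases h : i < j <;> simp [h]

lemma checkAt_roll (k i : Nat) : checkAt k i k = checkAt k (i + 1) 0 := by
  simp [checkAt, List.range_succ, List.flatMap_append]

lemma step2 (m1 m2 : List (List Int)) (k i j : Nat) (hi : i < k) (hj : j < k)
    (st : List (List Int) × List (List Int)) (h : SwapInv m1 m2 k st i j) :
    SwapInv m1 m2 k
      (if i = j then st
       else if checkScan st.2 [(i : Int), (j : Int)] = 0 then st
       else (set2 (set2 st.1 i j (g st.1 j i)) j i (g st.1 i j),
             st.2 ++ [[(j : Int), (i : Int)]])) i (j + 1) := by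
  obtain ⟨hsh, hchk, hval⟩ := h
  have hscan : checkScan st.2 [(i : Int), (j : Int)] = if j < i then 0 else 1 := by
    rw [hchk, checkScan_eq]
    by_cases h1 : j < i
    · rw [if_pos ((mem_checkAt k i j (by omega)).2 ⟨h1, hi⟩), if_pos h1]
    · rw [if_neg (fun hm => h1 ((mem_checkAt k i j (by omega)).1 hm).1), if_neg h1]
  by_cases hij : i = j
  · subst hij
    rw [if_pos rfl]
    refine ⟨hsh, ?_, fun a b ha hb => ?_⟩
    · rw [hchk, checkAt_succ_j, if_neg (lt_irrefl i), List.append_nil]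
    · rw [hval a b ha hb]
      have hiff : (a ≠ b ∧ (min a b < i ∨ (min a b = i ∧ max a b < i + 1)))
          ↔ (a ≠ b ∧ (min a b < i ∨ (min a b = i ∧ max a b < i))) := by omega
      simp only [hiff]
  · rw [if_neg hij]
    by_cases hlt : j < i
    · rw [if_pos (by rw [hscan]; simp [hlt])]
      refine ⟨hsh, ?_, fun a b ha hb => ?_⟩
      · rw [hchk, checkAt_succ_j, if_neg (by omega), List.append_nil]
      · rw [hval a b ha hb]
        have hiff : (a ≠ b ∧ (min a b < i ∨ (min a b = i ∧ max a b < j + 1)))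
            ↔ (a ≠ b ∧ (min a b < i ∨ (min a b = i ∧ max a b < j))) := by omega
        simp only [hiff]
    · -- i < j: swap and record [j, i]
      have hij' : i < j := by omega
      rw [if_neg (by rw [hscan]; simp [hlt])]
      have hr1 : i < st.1.length := by rw [hsh.1]; exact hi
      have hc1 : j < (st.1.getD i []).length := by rw [hsh.2 i hi]; exact hj
      have hsh' : MShape (set2 st.1 i j (g st.1 j i)) k := shape_set2 hsh i j _
      have hr2 : j < (set2 st.1 i j (g st.1 j i)).length := by rw [hsh'.1]; exact hj
      have hc2 : i < ((set2 st.1 i j (g st.1 j i)).getD j []).length := by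
        rw [hsh'.2 j hj]; exact hi
      refine ⟨shape_set2 hsh' j i _, ?_, fun a b ha hb => ?_⟩
      · simp only [hchk, checkAt_succ_j, if_pos hij']
      · rw [g_set2 _ j i a b _ hr2 hc2, g_set2 _ i j a b _ hr1 hc1]
        by_cases hA : a = j ∧ b = i
        · rw [if_pos hA, hA.1, hA.2]
          obtain ⟨ha1, hb1⟩ := hA
          rw [hval i j hi hj, if_neg (by omega), if_pos (by omega)]
        · rw [if_neg hA]
          by_cases hB : a = i ∧ b = j
          · rw [if_pos hB, hB.1, hB.2]
            obtain ⟨ha1, hb1⟩ := hB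
            rw [hval j i hj hi, if_neg (by omega), if_pos (by omega)]
          · rw [if_neg hB, hval a b ha hb]
            have hiff : (a ≠ b ∧ (min a b < i ∨ (min a b = i ∧ max a b < j + 1)))
                ↔ (a ≠ b ∧ (min a b < i ∨ (min a b = i ∧ max a b < j))) := by omega
            simp only [hiff]

lemma innerfold (m1 m2 : List (List Int)) (k i : Nat) (hi : i < k)
    (st : List (List Int) × List (List Int)) (h : SwapInv m1 m2 k st i 0)
    (t : Nat) (ht : t ≤ k) :
    SwapInv m1 m2 k ((List.range t).foldl (fun st (j : Nat) =>
      if i = j then st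
      else if checkScan st.2 [(i : Int), (j : Int)] = 0 then st
      else (set2 (set2 st.1 i j (g st.1 j i)) j i (g st.1 i j),
            st.2 ++ [[(j : Int), (i : Int)]])) st) i t := by
  induction t with
  | zero => simpa using h
  | succ t ih =>
    rw [List.range_succ, List.foldl_append, List.foldl_cons, List.foldl_nil]
    exact step2 m1 m2 k i t hi (by omega) _ (ih (by omega))

lemma roll (m1 m2 : List (List Int)) (k i : Nat)
    (st : List (List Int) × List (List Int)) (h : SwapInv m1 m2 k st i k) :
    SwapInv m1 m2 k st (i + 1) 0 := by
  obtain ⟨hsh, hchk, hval⟩ := h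
  refine ⟨hsh, by rw [hchk, checkAt_roll], fun a b ha hb => ?_⟩
  rw [hval a b ha hb]
  have hiff : (a ≠ b ∧ (min a b < i ∨ (min a b = i ∧ max a b < k)))
      ↔ (a ≠ b ∧ (min a b < i + 1 ∨ (min a b = i + 1 ∧ max a b < 0))) := by omega
  simp only [hiff]

lemma outerfold (m1 m2 : List (List Int)) (k : Nat)
    (st : List (List Int) × List (List Int)) (h : SwapInv m1 m2 k st 0 0)
    (t : Nat) (ht : t ≤ k) :
    SwapInv m1 m2 k ((List.range t).foldl (fun (st : List (List Int) × List (List Int)) (i : Nat) =>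
      (List.range k).foldl (fun st (j : Nat) =>
        if i = j then st
        else if checkScan st.2 [(i : Int), (j : Int)] = 0 then st
        else (set2 (set2 st.1 i j (g st.1 j i)) j i (g st.1 i j),
              st.2 ++ [[(j : Int), (i : Int)]])) st) st) t 0 := by
  induction t with
  | zero => simpa using h
  | succ t ih =>
    rw [List.range_succ, List.foldl_append, List.foldl_cons, List.foldl_nil]
    exact roll m1 m2 k t _ (innerfold m1 m2 k t (by omega) _ (ih (by omega)) k le_rfl)

lemma shape_newMat0 (k : Nat) :
    MShape ((List.range k).map (fun _ => (List.range k).map (fun _ => (0 : Int)))) k := by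
  refine ⟨by simp, fun c hc => ?_⟩
  rw [List.getD_eq_getElem?_getD]
  simp [List.getElem?_map, List.getElem?_range, hc]

lemma rows_eq (M : List (List Int)) (k : Nat) (hs : MShape M k) (f : Nat → Nat → Int)
    (hv : ∀ a b, a < k → b < k → g M a b = f a b) :
    M = (List.range k).map (fun a => (List.range k).map (fun b => f a b)) := by
  apply List.ext_getElem (by simp [hs.1])
  intro a h1 h2
  have hak : a < k := by simpa [hs.1] using h1
  have hrow : M[a] = M.getD a [] := by
    rw [List.getD_eq_getElem?_getD, List.getElem?_eq_getElem h1]; rfl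
  apply List.ext_getElem
  · have hl := hs.2 a hak
    rw [List.getD_eq_getElem?_getD] at hl
    rw [hrow, List.getD_eq_getElem?_getD]
    simp [hl, hak]
  · intro b hb1 hb2
    have hbk : b < k := by
      have := hs.2 a hak
      rw [hrow] at hb1; omega
    have : M[a][b] = g M a b := by
      rw [g, ← hrow, List.getD_eq_getElem?_getD, List.getElem?_eq_getElem hb1]; rfl
    simp [this, hv a b hak hbk, hak, hbk]

lemma main_case (m1 m2 : List (List Int)) (k : Nat) (hk : 0 < k)
    (hlen : m1.length = k) (hm : (m2.headD []).length = k) :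
    solution m1 m2 = solution_alt m1 m2 := by
  simp only [solution, solution_alt, hlen, hm]
  have hbase : SwapInv m1 m2 k
      ((List.range k).foldl (fun acc i =>
        (List.range k).foldl (fun acc q =>
          ((List.range k).foldl (fun (p : Int × List (List Int)) j =>
              (p.1 + g m1 i j * g m2 j q,
                if j = k - 1 then set2 p.2 i q (p.1 + g m1 i j * g m2 j q) else p.2))
            ((0 : Int), acc)).2) acc)
        ((List.range k).map (fun _ => (List.range k).map (fun _ => (0 : Int)))),
       ([] : List (List Int))) 0 0 := by
    obtain ⟨hsh, hval⟩ := ifold m1 m2 k hk _ (shape_newMat0 k) k le_rfl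
    refine ⟨hsh, by simp [checkAt], fun a b ha hb => ?_⟩
    rw [hval a b ha hb, if_pos ha, if_neg (by omega)]
  have hfin := outerfold m1 m2 k _ hbase k le_rfl
  obtain ⟨hsh, _, hval⟩ := hfin
  have := rows_eq _ k hsh (fun a b => Pmul m1 m2 k b a) (fun a b ha hb => by
    rw [hval a b ha hb]
    by_cases hab : a = b
    · subst hab; simp
    · rw [if_pos ⟨hab, by omega⟩])
  rw [this]
  simp only [Pmul]


-- ===== VERDICT (by name: the statement is the Claim_ definition above) =====
theorem solution_spec : Claim_equal_solution := by
  intro m1 m2 _ hpre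
  obtain ⟨hne, hcase⟩ := hpre
  unfold Spec_solution
  rcases hcase with hn | hm | ⟨hk1, _, _, _⟩
  · simp [solution, solution_alt, hn]
  · have hm' : (m2.head?.getD []).length = 0 := by rw [← List.headD_eq_head?_getD]; exact hm
    simp [solution, solution_alt, hm', foldl_self]
  · by_cases hk0 : (m2.headD []).length = 0
    · have hn' : m1.length = 0 := by omega
      simp [solution, solution_alt, hn']
    · exact main_case m1 m2 ((m2.headD []).length) (by omega) hk1 rfl
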